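-- pv_equiv track=rewrite | github.com/ucodia/dtst | dtst/commands/search.py | _dedup_results
-- ===== SOURCE A (Python) =====
-- def _dedup_results(results: list[dict]) -> list[dict]:
--     seen: dict[str, dict] = {}
--     for r in results:
--         url = r.get("url")
--         if not url:
--             continue
--         existing = seen.get(url)
--         if existing is None:
--             seen[url] = r
--         else:
--             existing_non_null = sum(1 for v in existing.values() if v is not None)
--             new_non_null = sum(1 for v in r.values() if v is not None)
--             if new_non_null > existing_non_null:
--                 seen[url] = r
--     return list(seen.values())
-- ===== SOURCE B (Python) =====
-- def _dedup_results(results: list[dict]) -> list[dict]: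
--     urls = []
--     for r in results:
--         u = r.get("url")
--         if u and u not in urls:
--             urls.append(u)
--     out = []
--     for u in urls:
--         best = None
--         for r in results:
--             if r.get("url") == u and (best is None or
--                     sum(v is not None for v in r.values()) >
--                     sum(v is not None for v in best.values())):
--                 best = r
--         out.append(best)
--     return out
-- ===== Notes on version B (the rewrite author's own statement) =====
-- stated objective: alternative
-- what changed: A does one pass keeping a url->best dict updated in place; B uses no dict at all: a first pass collects the distinct non-falsy urls in order, then for each url a separate linear scan over all results keeps the earliest record with strictly maximal non-null count.
import Mathlib
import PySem

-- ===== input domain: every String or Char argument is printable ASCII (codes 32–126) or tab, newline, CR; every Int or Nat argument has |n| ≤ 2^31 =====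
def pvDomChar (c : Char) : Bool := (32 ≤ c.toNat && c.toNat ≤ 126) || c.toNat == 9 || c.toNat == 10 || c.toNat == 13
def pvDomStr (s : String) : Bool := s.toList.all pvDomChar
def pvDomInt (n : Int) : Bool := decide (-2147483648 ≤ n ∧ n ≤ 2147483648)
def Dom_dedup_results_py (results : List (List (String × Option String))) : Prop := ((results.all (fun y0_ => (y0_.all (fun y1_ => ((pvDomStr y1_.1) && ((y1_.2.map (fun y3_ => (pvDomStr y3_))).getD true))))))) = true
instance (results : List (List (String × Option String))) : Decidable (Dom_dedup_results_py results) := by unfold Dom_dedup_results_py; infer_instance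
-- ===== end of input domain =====

-- B replaces A's single pass over a url→best dict by two dict-free passes: collect the
-- distinct non-falsy urls in order, then for each url linearly scan all results keeping the
-- earliest record with strictly maximal non-null count; objective: alternative (no dict).

-- ===== PORT A =====
-- Python r.get("url") collapsed with value-None: absent key and stored None both give None
def pvUrl (r : List (String × Option String)) : Option String :=
  match (PySem.Dict.mk r).get? "url" with
  | none => none
  | some none => none
  | some (some s) => some s

-- sum(1 for v in r.values() if v is not None)
def pvNonNull (r : List (String × Option String)) : Int :=
  r.foldl (fun n v => if v.2.isSome then n + 1 else n) 0

-- A's loop body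
def pvStepA (seen : PySem.Dict String (List (String × Option String)))
    (r : List (String × Option String)) : PySem.Dict String (List (String × Option String)) :=
  match pvUrl r with
  | none => seen
  | some url =>
    if url = "" then seen
    else
      match seen.get? url with
      | none => seen.insert url r
      | some existing =>
        if pvNonNull r > pvNonNull existing then seen.insert url r else seen

def dedup_results_py (results : List (List (String × Option String))) : List (List (String × Option String)) :=
  (results.foldl pvStepA PySem.Dict.empty).values

-- ===== PORT B =====
-- sum(v is not None for v in r.values())  (True counts as 1)
def pvCountB (r : List (String × Option String)) : Int :=
  (r.map (fun v => if v.2.isSome then (1 : Int) else 0)).sum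

-- first pass: `if u and u not in urls: urls.append(u)`
def pvUrlStep (urls : List String) (r : List (String × Option String)) : List String :=
  match pvUrl r with
  | none => urls
  | some u => if u = "" then urls else if u ∈ urls then urls else urls ++ [u]

-- inner scan: `if r.get("url") == u and (best is None or cnt(r) > cnt(best)): best = r`
def pvBestStep (u : String) (best : Option (List (String × Option String)))
    (r : List (String × Option String)) : Option (List (String × Option String)) :=
  if pvUrl r = some u then
    match best with
    | none => some r
    | some b => if pvCountB r > pvCountB b then some r else best
  else best

def dedup_results_py_alt (results : List (List (String × Option String))) : List (List (String × Option String)) :=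
  (results.foldl pvUrlStep []).map
    -- best is never None for a collected url, so the `.getD []` default is unreachable
    (fun u => (results.foldl (pvBestStep u) none).getD [])

-- ===== PRECONDITION & SPEC =====
def Spec_dedup_results_py (results : List (List (String × Option String))) (out : List (List (String × Option String))) : Prop := out = dedup_results_py_alt results
instance (results : List (List (String × Option String))) (out : List (List (String × Option String))) : Decidable (Spec_dedup_results_py results out) := by unfold Spec_dedup_results_py; infer_instance

-- ===== CLAIM (what is proved, stated in full; the proofs are below) =====
def Claim_equal_dedup_results_py : Prop := ∀ (results : List (List (String × Option String))), Dom_dedup_results_py results → Spec_dedup_results_py results (dedup_results_py results)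

-- ===== LEMMAS AND PROOFS =====

-- the two non-null counters agree
lemma pv_count_eq (r : List (String × Option String)) : pvCountB r = pvNonNull r := by
  unfold pvCountB pvNonNull
  suffices h : ∀ (n : Int), r.foldl (fun n v => if v.2.isSome then n + 1 else n) n
      = n + (r.map (fun v => if v.2.isSome then (1 : Int) else 0)).sum by
    simpa using (h 0).symm
  induction r with
  | nil => simp
  | cons x t ih => intro n; simp only [List.foldl_cons, List.map_cons, List.sum_cons, ih]; split <;> ring

-- first-pass fold keeps the url list nodup and free of ""
lemma pv_urls_inv (l : List (List (String × Option String))) (urls : List String)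
    (hnd : urls.Nodup) (hne : "" ∉ urls) :
    (l.foldl pvUrlStep urls).Nodup ∧ "" ∉ l.foldl pvUrlStep urls := by
  induction l generalizing urls with
  | nil => exact ⟨hnd, hne⟩
  | cons r t ih =>
    simp only [List.foldl_cons]
    unfold pvUrlStep
    cases pvUrl r with
    | none => exact ih urls hnd hne
    | some u =>
      by_cases h0 : u = ""
      · simp only [if_pos h0]; exact ih urls hnd hne
      · simp only [if_neg h0]
        by_cases hm : u ∈ urls
        · simp only [if_pos hm]; exact ih urls hnd hne
        · simp only [if_neg hm]
          refine ih _ (List.Nodup.append hnd (List.nodup_singleton u)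
            (List.disjoint_singleton.mpr hm)) ?_
          simp only [List.mem_append, List.mem_singleton]
          rintro (h | h)
          · exact hne h
          · exact h0 h.symm

-- main invariant: A's dict keys mirror B's url list and, per nonempty url,
-- A's stored record equals B's best-so-far scan value
lemma pv_loop (l : List (List (String × Option String)))
    (d : PySem.Dict String (List (String × Option String)))
    (urls : List String) (b : String → Option (List (String × Option String)))
    (hk : d.keys = urls)
    (hv : ∀ u, u ≠ "" → d.get? u = b u) :
    (l.foldl pvStepA d).keys = l.foldl pvUrlStep urls ∧
    ∀ u, u ≠ "" → (l.foldl pvStepA d).get? u = l.foldl (pvBestStep u) (b u) := by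
  induction l generalizing d urls b with
  | nil => exact ⟨hk, hv⟩
  | cons r t ih =>
    simp only [List.foldl_cons]
    cases hu : pvUrl r with
    | none =>
      have hA : pvStepA d r = d := by simp only [pvStepA, hu]
      have hU : pvUrlStep urls r = urls := by simp only [pvUrlStep, hu]
      rw [hA, hU]
      refine ih d urls (fun u => pvBestStep u (b u) r) hk ?_
      intro u hu0
      show d.get? u = pvBestStep u (b u) r
      simp only [pvBestStep, hu]
      rw [if_neg (by simp), hv u hu0]
    | some v =>
      by_cases h0 : v = ""
      · subst h0
        have hA : pvStepA d r = d := by simp [pvStepA, hu]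
        have hU : pvUrlStep urls r = urls := by simp [pvUrlStep, hu]
        rw [hA, hU]
        refine ih d urls (fun u => pvBestStep u (b u) r) hk ?_
        intro u hu0
        show d.get? u = pvBestStep u (b u) r
        simp only [pvBestStep, hu]
        rw [if_neg (by intro h; exact hu0 (Option.some.inj h).symm), hv u hu0]
      · cases hg : d.get? v with
        | none =>
          have hA : pvStepA d r = d.insert v r := by
            simp only [pvStepA, hu, if_neg h0, hg]
          have hnm : v ∉ urls := hk ▸ (PySem.Dict.get?_eq_none_iff_not_mem_keys d v).mp hg
          have hU : pvUrlStep urls r = urls ++ [v] := by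
            simp only [pvUrlStep, hu, if_neg h0, if_neg hnm]
          have hcA : d.contains v = false := by
            cases hc : d.contains v with
            | false => rfl
            | true => exact absurd (hk ▸ (PySem.Dict.contains_iff_mem_keys d v).mp hc) hnm
          rw [hA, hU]
          refine ih (d.insert v r) (urls ++ [v]) (fun u => pvBestStep u (b u) r) ?_ ?_
          · rw [PySem.Dict.keys_insert_of_not_contains d r hcA, hk]
          · intro u hu0
            show (d.insert v r).get? u = pvBestStep u (b u) r
            simp only [pvBestStep, hu]
            rw [PySem.Dict.get?_insert]
            by_cases huv : u = v
            · subst huv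
              rw [if_pos rfl, if_pos rfl, ← hv u hu0, hg]
            · rw [if_neg huv, if_neg (fun h => huv (Option.some.inj h).symm), hv u hu0]
        | some existing =>
          have hbv : b v = some existing := by rw [← hv v h0, hg]
          have hmem : v ∈ urls := by
            have h1 : d.get? v ≠ none := by simp [hg]
            have h2 := (not_iff_not.mpr (PySem.Dict.get?_eq_none_iff_not_mem_keys d v)).mp h1
            exact hk ▸ not_not.mp h2
          have hU : pvUrlStep urls r = urls := by
            simp only [pvUrlStep, hu, if_neg h0, if_pos hmem]
          have hcA : d.contains v = true := by
            rw [PySem.Dict.contains_iff_mem_keys, hk]; exact hmem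
          rw [hU]
          have hstep2 : ∀ u, u ≠ "" → pvBestStep u (b u) r =
              (if pvNonNull r > pvNonNull existing then d.insert v r else d).get? u := by
            intro u hu0
            simp only [pvBestStep, hu]
            by_cases huv : u = v
            · subst huv
              rw [if_pos rfl, hbv]
              show (if pvCountB r > pvCountB existing then some r else some existing) = _
              rw [pv_count_eq r, pv_count_eq existing]
              by_cases hlt : pvNonNull r > pvNonNull existing
              · rw [if_pos hlt, if_pos hlt, PySem.Dict.get?_insert, if_pos rfl]
              · rw [if_neg hlt, if_neg hlt, hg]
            · rw [if_neg (fun h => huv (Option.some.inj h).symm)]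
              by_cases hlt : pvNonNull r > pvNonNull existing
              · rw [if_pos hlt, PySem.Dict.get?_insert, if_neg huv]
                exact (hv u hu0).symm
              · rw [if_neg hlt]; exact (hv u hu0).symm
          by_cases hlt : pvNonNull r > pvNonNull existing
          · have hA : pvStepA d r = d.insert v r := by
              simp only [pvStepA, hu, if_neg h0, hg, if_pos hlt]
            rw [hA]
            refine ih (d.insert v r) urls (fun u => pvBestStep u (b u) r) ?_ ?_
            · rw [PySem.Dict.keys_insert_of_contains d r hcA, hk]
            · intro u hu0
              show (d.insert v r).get? u = pvBestStep u (b u) r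
              rw [hstep2 u hu0, if_pos hlt]
          · have hA : pvStepA d r = d := by
              simp only [pvStepA, hu, if_neg h0, hg, if_neg hlt]
            rw [hA]
            refine ih d urls (fun u => pvBestStep u (b u) r) hk ?_
            intro u hu0
            show d.get? u = pvBestStep u (b u) r
            rw [hstep2 u hu0, if_neg hlt]

-- ===== VERDICT (by name: the statement is the Claim_ definition above) =====
theorem dedup_results_py_spec : Claim_equal_dedup_results_py := by
  intro results _
  unfold Spec_dedup_results_py dedup_results_py dedup_results_py_alt
  obtain ⟨hk, hv⟩ := pv_loop results PySem.Dict.empty [] (fun _ => none) rfl (fun _ _ => rfl)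
  obtain ⟨hnd, hne⟩ := pv_urls_inv results [] List.nodup_nil (by simp)
  rw [PySem.Dict.values_eq_map_keys _ (hk ▸ hnd) [], hk]
  refine List.map_congr_left (fun u hu => ?_)
  have hu0 : u ≠ "" := fun h => hne (h ▸ hu)
  rw [PySem.Dict.getD_eq_get?_getD, hv u hu0]
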